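-- pv_equiv track=rewrite | github.com/jcolinpatrick/kryptos | scripts/e_grille_18_equal_misspelling_params.py | columnar_read
-- ===== SOURCE A (Python) =====
-- import math
--
-- def columnar_read(text, width):
--     """Read text in columnar order with given width (write by rows, read by columns)."""
--     nrows = math.ceil(len(text) / width)
--     padded = text.ljust(nrows * width, '?')
--     result = []
--     for c in range(width):
--         for r in range(nrows):
--             idx = r * width + c
--             if idx < len(text):
--                 result.append(text[idx])
--     return ''.join(result)
-- ===== SOURCE B (Python) =====
-- def columnar_read(text, width):
--     """Read text in columnar order with given width (write by rows, read by columns)."""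
--     return ''.join(text[c::width] for c in range(width))
-- ===== Notes on version B (the rewrite author's own statement) =====
-- stated objective: simpler
-- what changed: Replaces the nested row/column index loop (with ceil, padding and a bounds check) by one pass that concatenates the strided slices text[c::width], which are exactly the columns.
import Mathlib
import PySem

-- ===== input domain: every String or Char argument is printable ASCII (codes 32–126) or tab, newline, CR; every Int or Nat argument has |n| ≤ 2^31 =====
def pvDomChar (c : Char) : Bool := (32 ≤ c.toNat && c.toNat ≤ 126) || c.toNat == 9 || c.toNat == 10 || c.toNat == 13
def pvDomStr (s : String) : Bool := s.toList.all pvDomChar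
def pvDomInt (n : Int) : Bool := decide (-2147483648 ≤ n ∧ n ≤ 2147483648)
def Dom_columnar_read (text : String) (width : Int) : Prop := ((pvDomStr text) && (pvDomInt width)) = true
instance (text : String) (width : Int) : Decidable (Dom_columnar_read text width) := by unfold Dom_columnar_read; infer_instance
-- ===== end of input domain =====

-- B replaces A's nested row/column index loop (ceil, padding, bounds check) by a single
-- concatenation of the strided column slices text[c::width]; objective: simpler (measured
-- constant-factor speedup from slicing in C instead of per-character indexing).

-- ===== PORT A =====
def columnar_read (text : String) (width : Int) : String :=
  let tl := text.toList
  let n : Int := tl.length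
  let nrows : Int := -(PySem.Int.floordiv (-n) width)   -- math.ceil(len(text)/width)
  let _padded := tl ++ List.replicate ((nrows * width).toNat - tl.length) '?'  -- dead in A too
  let result : List Char :=
    (PySem.List.pyRange 0 width 1).foldl (fun acc c =>
      (PySem.List.pyRange 0 nrows 1).foldl (fun acc2 r =>
        let idx := r * width + c
        if idx < n then acc2 ++ [PySem.List.pyGetD tl idx '?'] else acc2) acc) []
  String.ofList result

-- ===== PORT B =====
def columnar_read_alt (text : String) (width : Int) : String :=
  String.ofList ((PySem.List.pyRange 0 width 1).foldl
    (fun acc c => acc ++ (PySem.List.slice? text.toList (some c) none width).getD []) [])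

-- ===== PRECONDITION & SPEC =====
-- Pre_ excludes only width == 0, where A raises ZeroDivisionError in math.ceil(len(text)/width).
def Pre_columnar_read (text : String) (width : Int) : Prop := width ≠ 0
instance (text : String) (width : Int) : Decidable (Pre_columnar_read text width) := by unfold Pre_columnar_read; infer_instance
def pvWitness_columnar_read : String × Int := ("HELLOWORLD", 3)
def Spec_columnar_read (text : String) (width : Int) (out : String) : Prop := out = columnar_read_alt text width
instance (text : String) (width : Int) (out : String) : Decidable (Spec_columnar_read text width out) := by unfold Spec_columnar_read; infer_instance

-- ===== CLAIM (what is proved, stated in full; the proofs are below) =====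
def Claim_equal_columnar_read : Prop := ∀ (text : String) (width : Int), Dom_columnar_read text width → Pre_columnar_read text width → Spec_columnar_read text width (columnar_read text width)

-- ===== LEMMAS AND PROOFS =====

-- Column c of A (the elements its inner row loop collects), for 0 < width and 0 ≤ c:
-- the slice text[c::width] returns exactly the same characters.
theorem pv_col_eq (tl : List Char) (width c : Int) (hw : 0 < width) (hc : 0 ≤ c) :
    ((PySem.List.pyRange 0 (-(PySem.Int.floordiv (-(tl.length : Int)) width)) 1).filter
        (fun r => decide (r * width + c < (tl.length : Int)))).map
      (fun r => PySem.List.pyGetD tl (r * width + c) '?')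
      = (PySem.List.slice? tl (some c) none width).getD [] := by
  set n : Int := (tl.length : Int) with hn
  have hn0 : 0 ≤ n := by positivity
  set nrows : Int := -(PySem.Int.floordiv (-n) width) with hnr
  have hbr : (nrows - 1) * width < n ∧ n ≤ nrows * width :=
    (PySem.Int.neg_floordiv_neg_eq_iff_of_pos hw).mp hnr.symm
  by_cases hcn : c < n
  · -- c hits the text: both sides are the q = ceil((n-c)/width) column characters
    set q : Int := (n - c + width - 1) / width with hq
    have hdm : width * q + (n - c + width - 1) % width = n - c + width - 1 :=
      (Int.mul_ediv_add_emod _ _)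
    have hr0 : 0 ≤ (n - c + width - 1) % width := Int.emod_nonneg _ hw.ne'
    have hr1 : (n - c + width - 1) % width < width := Int.emod_lt_of_pos _ hw
    have hq1 : q * width ≤ n - c + width - 1 := by nlinarith
    have hq2 : n - c + width - 1 < (q + 1) * width := by nlinarith
    have hq0 : 0 ≤ q := Int.ediv_nonneg (by omega) hw.le
    have hqle : q ≤ nrows := by nlinarith [hbr.2]
    have hfilter : (PySem.List.pyRange 0 nrows 1).filter
        (fun r => decide (r * width + c < n)) = PySem.List.pyRange 0 q 1 := by
      rw [PySem.List.pyRange_one_append 0 q nrows hq0 hqle, List.filter_append]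
      have h1 : (PySem.List.pyRange 0 q 1).filter (fun r => decide (r * width + c < n))
          = PySem.List.pyRange 0 q 1 := by
        rw [List.filter_eq_self]
        intro r hr
        obtain ⟨hr0, hrq⟩ := PySem.List.mem_pyRange_one.mp hr
        have : r * width ≤ (q - 1) * width :=
          mul_le_mul_of_nonneg_right (by omega) hw.le
        simp only [decide_eq_true_eq]
        nlinarith
      have h2 : (PySem.List.pyRange q nrows 1).filter (fun r => decide (r * width + c < n))
          = [] := by
        rw [List.filter_eq_nil_iff]
        intro r hr
        obtain ⟨hqr, _⟩ := PySem.List.mem_pyRange_one.mp hr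
        have : q * width ≤ r * width := mul_le_mul_of_nonneg_right hqr hw.le
        simp only [decide_eq_true_eq]
        nlinarith
      rw [h1, h2, List.append_nil]
    have hslice : (PySem.List.slice? tl (some c) none width).getD []
        = List.filterMap (fun (k : Nat) => tl[(c + width * (k : Int)).toNat]?)
            (List.range q.toNat) := by
      simp [PySem.List.slice?, PySem.List.sliceIndices, hw.ne', not_lt.mpr hw.le,
        min_eq_left hcn.le, hw, ← hn, hcn, not_lt.mpr hc, ← hq]
    rw [hfilter, hslice]
    have hidx : ∀ k : Nat, k < q.toNat → c + width * (k : Int) < n ∧ 0 ≤ c + width * (k : Int) := by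
      intro k hk
      have hkq : (k : Int) ≤ q - 1 := by omega
      have : width * (k : Int) ≤ width * (q - 1) := mul_le_mul_of_nonneg_left hkq hw.le
      constructor
      · nlinarith
      · positivity
    have hmap : List.filterMap (fun (k : Nat) => tl[(c + width * (k : Int)).toNat]?)
        (List.range q.toNat)
        = (List.range q.toNat).map (fun (k : Nat) => tl.getD (c + width * (k : Int)).toNat '?') := by
      have hcg : List.filterMap (fun (k : Nat) => tl[(c + width * (k : Int)).toNat]?)
          (List.range q.toNat)
          = List.filterMap (some ∘ fun (k : Nat) => tl.getD (c + width * (k : Int)).toNat '?')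
            (List.range q.toNat) := by
        apply List.filterMap_congr
        intro k hk
        have hk' : k < q.toNat := List.mem_range.mp hk
        obtain ⟨hlt, hge⟩ := hidx k hk'
        have hlt' : (c + width * (k : Int)).toNat < tl.length := by omega
        simp [List.getElem?_eq_getElem hlt', List.getD_eq_getElem?_getD]
      rw [hcg, List.filterMap_eq_map]
    rw [hmap]
    have hq' : q = ((q.toNat : Nat) : Int) := by omega
    rw [hq', PySem.List.pyRange_zero_nat, List.map_map]
    apply List.map_congr_left
    intro k hk
    have hk' : k < q.toNat := List.mem_range.mp hk
    obtain ⟨hlt, hge⟩ := hidx k hk'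
    have heq : (k : Int) * width + c = c + width * (k : Int) := by ring
    simp only [Function.comp]
    rw [PySem.List.pyGetD_of_nonneg tl '?' (by positivity)]
    rw [show ((k : Int) * width + c) = c + width * (k : Int) from by ring]
  · -- c is past the text (width > length): both sides empty
    have hslice : (PySem.List.slice? tl (some c) none width).getD [] = [] := by
      simp [PySem.List.slice?, PySem.List.sliceIndices, hw.ne', not_lt.mpr hw.le,
        min_eq_right (not_lt.mp hcn), hw, ← hn, not_lt.mpr hc]
    rw [hslice]
    have : (PySem.List.pyRange 0 nrows 1).filter (fun r => decide (r * width + c < n)) = [] := by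
      rw [List.filter_eq_nil_iff]
      intro r hr
      obtain ⟨hr0, _⟩ := PySem.List.mem_pyRange_one.mp hr
      have : 0 ≤ r * width := mul_nonneg hr0 hw.le
      simp only [decide_eq_true_eq]
      omega
    rw [this, List.map_nil]

theorem pv_main (tl : List Char) (width : Int) (hw : width ≠ 0) :
    (PySem.List.pyRange 0 width 1).foldl (fun acc c =>
      (PySem.List.pyRange 0 (-(PySem.Int.floordiv (-(tl.length : Int)) width)) 1).foldl (fun acc2 r =>
        if r * width + c < (tl.length : Int) then acc2 ++ [PySem.List.pyGetD tl (r * width + c) '?'] else acc2) acc) []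
    = (PySem.List.pyRange 0 width 1).foldl
        (fun acc c => acc ++ (PySem.List.slice? tl (some c) none width).getD []) [] := by
  rcases lt_or_gt_of_ne hw with hneg | hpos
  · rw [show PySem.List.pyRange 0 width 1 = [] from PySem.List.pyRange_one_eq_nil (by omega)]
    rfl
  · apply PySem.List.foldl_congr_mem
    intro acc c hc
    obtain ⟨hc0, _⟩ := PySem.List.mem_pyRange_one.mp hc
    have h1 := PySem.List.foldl_append_if (fun r => decide (r * width + c < (tl.length : Int)))
      (fun r => PySem.List.pyGetD tl (r * width + c) '?')
      (PySem.List.pyRange 0 (-(PySem.Int.floordiv (-(tl.length : Int)) width)) 1) acc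
    simp only [decide_eq_true_eq] at h1
    rw [h1, pv_col_eq tl width c hpos hc0]

-- ===== VERDICT (by name: the statement is the Claim_ definition above) =====
theorem columnar_read_spec : Claim_equal_columnar_read := by
  intro text width _ hpre
  unfold Spec_columnar_read columnar_read columnar_read_alt
  simp only []
  exact congrArg String.ofList (pv_main text.toList width hpre)
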